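-- pv_equiv track=rewrite | github.com/megarcia/Garcia_etal_2021 | Fig_08/plot_selected_flights_map_+_profiles.py | get_idxs
-- ===== SOURCE A (Python) =====
-- def get_idxs(alt_all, sfc_all):
--     idx1 = 0
--     for idx, alt in enumerate(alt_all):
--         if alt > sfc_all[idx]:
--             idx1 = idx - 1
--             break
--     idx2 = -1
--     for idx in range(len(alt_all)-1, -1, -1):
--         if alt_all[idx] > sfc_all[idx]:
--             idx2 = idx + 2
--             break
--     return idx1, idx2
-- ===== SOURCE B (Python) =====
-- def get_idxs(alt_all, sfc_all):
--     first = None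
--     last = None
--     for idx, alt in enumerate(alt_all):
--         if alt > sfc_all[idx]:
--             if first is None:
--                 first = idx
--             last = idx
--     idx1 = first - 1 if first is not None else 0
--     idx2 = last + 2 if last is not None else -1
--     return idx1, idx2
-- ===== Notes on version B (the rewrite author's own statement) =====
-- stated objective: alternative
-- what changed: Replaces A's two early-break scans (a forward scan and a separate backward index scan) with one full forward pass that records the first and last matching index in two Option variables, deriving both results after the loop.
import Mathlib
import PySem

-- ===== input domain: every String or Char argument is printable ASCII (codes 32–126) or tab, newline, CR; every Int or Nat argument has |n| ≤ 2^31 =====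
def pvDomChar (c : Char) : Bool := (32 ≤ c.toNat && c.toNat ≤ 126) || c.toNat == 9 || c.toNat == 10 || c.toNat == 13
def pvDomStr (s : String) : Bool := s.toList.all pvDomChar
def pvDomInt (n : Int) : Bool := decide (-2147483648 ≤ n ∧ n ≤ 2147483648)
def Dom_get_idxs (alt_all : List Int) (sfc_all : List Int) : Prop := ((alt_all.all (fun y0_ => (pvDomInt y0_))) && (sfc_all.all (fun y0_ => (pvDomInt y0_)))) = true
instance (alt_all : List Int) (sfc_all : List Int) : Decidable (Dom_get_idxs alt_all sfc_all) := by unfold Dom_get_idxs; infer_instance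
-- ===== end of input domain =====

-- B replaces A's two early-break scans (forward, then backward) by one full forward
-- pass recording the first and last matching index (objective: alternative, same cost).

-- ===== PORT A =====
-- forward loop: 'for idx, alt in enumerate(alt_all): if alt > sfc_all[idx]: idx1 = idx-1; break'
def pvFwdA (sfc_all : List Int) : List (Int × Int) → Int
  | [] => 0
  | (idx, alt) :: rest =>
      if alt > PySem.List.pyGetD sfc_all idx 0 then idx - 1 else pvFwdA sfc_all rest

-- backward loop: 'for idx in range(len(alt_all)-1, -1, -1): if alt_all[idx] > sfc_all[idx]: idx2 = idx+2; break'
def pvBwdA (alt_all sfc_all : List Int) : List Int → Int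
  | [] => -1
  | idx :: rest =>
      if PySem.List.pyGetD alt_all idx 0 > PySem.List.pyGetD sfc_all idx 0 then idx + 2
      else pvBwdA alt_all sfc_all rest

def get_idxs (alt_all : List Int) (sfc_all : List Int) : Int × Int :=
  (pvFwdA sfc_all (PySem.List.enumerate alt_all 0),
   pvBwdA alt_all sfc_all (PySem.List.pyRange ((alt_all.length : Int) - 1) (-1) (-1)))

-- ===== PORT B =====
def pvStepB (sfc_all : List Int) (st : Option Int × Option Int) (p : Int × Int) :
    Option Int × Option Int :=
  if p.2 > PySem.List.pyGetD sfc_all p.1 0 then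
    ((st.1.orElse fun _ => some p.1), some p.1)
  else st

def get_idxs_alt (alt_all : List Int) (sfc_all : List Int) : Int × Int :=
  let st := (PySem.List.enumerate alt_all 0).foldl (pvStepB sfc_all) (none, none)
  ((match st.1 with | some f => f - 1 | none => 0),
   (match st.2 with | some l => l + 2 | none => -1))

-- ===== PRECONDITION & SPEC =====
-- Pre_ excludes exactly the inputs where the Python A raises IndexError
-- (some accessed index reaches past sfc_all, i.e. alt_all longer than sfc_all).
def Pre_get_idxs (alt_all : List Int) (sfc_all : List Int) : Prop :=
  alt_all.length ≤ sfc_all.length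
instance (alt_all : List Int) (sfc_all : List Int) : Decidable (Pre_get_idxs alt_all sfc_all) := by
  unfold Pre_get_idxs; infer_instance

def pvWitness_get_idxs : List Int × List Int := ([0, 5], [3, 2])

def Spec_get_idxs (alt_all : List Int) (sfc_all : List Int) (out : Int × Int) : Prop := out = get_idxs_alt alt_all sfc_all
instance (alt_all : List Int) (sfc_all : List Int) (out : Int × Int) : Decidable (Spec_get_idxs alt_all sfc_all out) := by unfold Spec_get_idxs; infer_instance

-- ===== CLAIM (what is proved, stated in full; the proofs are below) =====
def Claim_equal_get_idxs : Prop := ∀ (alt_all : List Int) (sfc_all : List Int), Dom_get_idxs alt_all sfc_all → Pre_get_idxs alt_all sfc_all → Spec_get_idxs alt_all sfc_all (get_idxs alt_all sfc_all)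

-- ===== LEMMAS AND PROOFS =====

-- the match predicate, shared by both characterisations
def pvQ (sfc_all : List Int) (p : Int × Int) : Bool :=
  decide (p.2 > PySem.List.pyGetD sfc_all p.1 0)

theorem pvFwdA_eq_find (sfc_all : List Int) (L : List (Int × Int)) :
    pvFwdA sfc_all L = match L.find? (pvQ sfc_all) with
      | some p => p.1 - 1
      | none => 0 := by
  induction L with
  | nil => simp [pvFwdA]
  | cons x t ih =>
      obtain ⟨i, a⟩ := x
      by_cases h : a > PySem.List.pyGetD sfc_all i 0 <;>
        simp [pvFwdA, List.find?, pvQ, h, ih]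

theorem pvBwdA_eq_find (alt_all sfc_all : List Int) (R : List Int) :
    pvBwdA alt_all sfc_all R =
      match (R.map (fun i => (i, PySem.List.pyGetD alt_all i 0))).find? (pvQ sfc_all) with
      | some p => p.1 + 2
      | none => -1 := by
  induction R with
  | nil => simp [pvBwdA]
  | cons i t ih =>
      by_cases h : PySem.List.pyGetD alt_all i 0 > PySem.List.pyGetD sfc_all i 0 <;>
        simp [pvBwdA, List.find?, pvQ, h, ih]

theorem pvFoldB_char (sfc_all : List Int) (L : List (Int × Int)) :
    ∀ (a b : Option Int),
      L.foldl (pvStepB sfc_all) (a, b) =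
        ((a.orElse fun _ => (L.find? (pvQ sfc_all)).map (·.1)),
         ((L.reverse.find? (pvQ sfc_all)).map (·.1)).orElse fun _ => b) := by
  induction L with
  | nil => intro a b; simp
  | cons x t ih =>
      intro a b
      by_cases h : x.2 > PySem.List.pyGetD sfc_all x.1 0
      · simp only [List.foldl_cons, pvStepB, if_pos h, ih]
        rw [List.reverse_cons, List.find?_append]
        cases a <;> cases (t.reverse.find? (pvQ sfc_all)) <;>
          simp [List.find?, pvQ, h, Option.orElse]
      · simp only [List.foldl_cons, pvStepB, if_neg h, ih]
        rw [List.reverse_cons, List.find?_append]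
        simp [List.find?, pvQ, h]

theorem get_idxs_spec : Claim_equal_get_idxs := by
  intro alt_all sfc_all _hdom _hpre
  unfold Spec_get_idxs get_idxs get_idxs_alt
  rw [pvFoldB_char]
  have hE : PySem.List.enumerate alt_all 0 =
      (PySem.List.pyRange 0 (alt_all.length : Int) 1).map
        (fun j => (j, PySem.List.pyGetD alt_all j 0)) :=
    PySem.List.enumerate_eq_map_pyRange alt_all 0
  have hR : PySem.List.pyRange ((alt_all.length : Int) - 1) (-1) (-1) =
      (PySem.List.pyRange 0 (alt_all.length : Int) 1).reverse := by
    have := PySem.List.pyRange_neg_one_eq_reverse ((alt_all.length : Int) - 1) (-1)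
    simpa using this
  rw [pvFwdA_eq_find, pvBwdA_eq_find, hR, List.map_reverse, ← hE]
  cases (PySem.List.enumerate alt_all 0).find? (pvQ sfc_all) <;>
    cases ((PySem.List.enumerate alt_all 0).reverse.find? (pvQ sfc_all)) <;>
      simp [Option.orElse]
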